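-- pv_equiv track=rewrite | github.com/aradhyasakalley/Sem6-Pracs | IS/columnar_cipher.py | columnar_matrix
-- ===== SOURCE A (Python) =====
-- def columnar_matrix(n,plain_text):
--     matrix = []
--     for i in range(n):
--         row = []
--         for j in range(n):
--             index = i*n + j
--             if index < len(plain_text):
--                 row.append(plain_text[index])
--             else:
--                 row.append('@')
--         matrix.append(row)
--     return matrix
-- ===== SOURCE B (Python) =====
-- def columnar_matrix(n, plain_text):
--     if n <= 0:
--         return []
--     size = n * n
--     flat = [ch for ch in plain_text][:size]
--     flat += ['@'] * (size - len(flat))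
--     return [flat[i * n:(i + 1) * n] for i in range(n)]
-- ===== Notes on version B (the rewrite author's own statement) =====
-- stated objective: simpler
-- what changed: Replaces the nested per-cell bounds-checked loop with building one flat padded character list (truncate to n*n, pad with '@') and chunking it into rows by slicing.
import Mathlib
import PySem

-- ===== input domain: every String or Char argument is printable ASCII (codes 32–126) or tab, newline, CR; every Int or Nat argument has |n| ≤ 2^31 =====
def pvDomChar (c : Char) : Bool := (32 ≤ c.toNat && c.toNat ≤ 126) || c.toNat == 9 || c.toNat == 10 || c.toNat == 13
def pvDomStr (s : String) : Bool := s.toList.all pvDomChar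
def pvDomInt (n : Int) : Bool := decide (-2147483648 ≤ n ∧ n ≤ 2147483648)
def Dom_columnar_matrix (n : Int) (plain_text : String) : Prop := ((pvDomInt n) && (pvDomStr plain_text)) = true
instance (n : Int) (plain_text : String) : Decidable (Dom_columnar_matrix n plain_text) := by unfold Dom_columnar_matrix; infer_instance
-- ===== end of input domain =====

-- B builds one flat truncated-and-padded character list and chunks it into rows by slicing,
-- instead of A's per-cell bounds check inside a nested loop (objective: simpler decomposition).

-- ===== PORT A =====
def columnar_matrix (n : Int) (plain_text : String) : List (List String) :=
  let cs := plain_text.toList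
  (PySem.List.pyRange 0 n 1).foldl (fun matrix i =>
    let row := (PySem.List.pyRange 0 n 1).foldl (fun row j =>
      let index := i * n + j
      if index < (cs.length : Int) then
        -- plain_text[index]: index is always in range here, so the getD default is never used
        row ++ [((PySem.List.pyGet? cs index).map (fun c => String.ofList [c])).getD "@"]
      else
        row ++ ["@"]) []
    matrix ++ [row]) []

-- ===== PORT B =====
def columnar_matrix_alt (n : Int) (plain_text : String) : List (List String) :=
  if n ≤ 0 then [] else
  let size := n * n
  -- flat = [ch for ch in plain_text][:size]
  let flat0 := PySem.List.slice (plain_text.toList.map (fun c => String.ofList [c])) none (some size)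
  -- flat += ['@'] * (size - len(flat))   (list-repeat of a negative count is empty, as toNat gives)
  let flat := flat0 ++ List.replicate (size - (flat0.length : Int)).toNat "@"
  -- [flat[i*n:(i+1)*n] for i in range(n)]
  (PySem.List.pyRange 0 n 1).map (fun i => PySem.List.slice flat (some (i * n)) (some ((i + 1) * n)))

-- ===== PRECONDITION & SPEC =====
def Spec_columnar_matrix (n : Int) (plain_text : String) (out : List (List String)) : Prop := out = columnar_matrix_alt n plain_text
instance (n : Int) (plain_text : String) (out : List (List String)) : Decidable (Spec_columnar_matrix n plain_text out) := by unfold Spec_columnar_matrix; infer_instance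

-- ===== CLAIM (what is proved, stated in full; the proofs are below) =====
def Claim_equal_columnar_matrix : Prop := ∀ (n : Int) (plain_text : String), Dom_columnar_matrix n plain_text → Spec_columnar_matrix n plain_text (columnar_matrix n plain_text)

-- ===== LEMMAS AND PROOFS =====

-- indexing into the truncate-then-pad list is `getD` on the original (below the padded length)
lemma pv_padded_getElem? {α : Type} (xs : List α) (d : α) (N k : Nat) (hk : k < N) :
    (xs.take N ++ List.replicate (N - (xs.take N).length) d)[k]? = some ((xs[k]?).getD d) := by
  by_cases h : k < xs.length
  · rw [List.getElem?_append_left (by simp [List.length_take]; omega)]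
    rw [List.getElem?_take, if_pos hk, List.getElem?_eq_getElem h]
    simp
  · rw [List.getElem?_append_right (by simp [List.length_take]; omega)]
    rw [List.getElem?_replicate, if_pos (by simp [List.length_take]; omega),
        List.getElem?_eq_none (by omega)]
    simp

lemma pv_lt_sq {a k m : Nat} (ha : a < m) (hk : k < m) : a * m + k < m * m := by
  calc a * m + k < a * m + m := by omega
    _ = (a + 1) * m := by ring
    _ ≤ m * m := Nat.mul_le_mul_right m (by omega)

lemma pv_main (n : Int) (pt : String) : columnar_matrix n pt = columnar_matrix_alt n pt := by
  by_cases h : 0 < n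
  · obtain ⟨m, rfl⟩ : ∃ m : Nat, n = (m : Int) := ⟨n.toNat, by omega⟩
    simp only [columnar_matrix, columnar_matrix_alt]
    rw [if_neg (by omega : ¬ ((m : Nat) : Int) ≤ 0)]
    rw [PySem.List.pyRange_one]
    rw [show ((m : Int) - 0).toNat = m from by omega]
    simp only [List.foldl_map, List.map_map,
      PySem.List.foldl_append_singleton_eq_map, List.nil_append, zero_add]
    rw [show ((m : Int) * ↑m) = ((m * m : Nat) : Int) from by push_cast; ring]
    rw [PySem.List.slice_to_natCast]
    rw [show (((m * m : Nat) : Int) -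
          ↑((List.take (m * m) (List.map (fun c => String.ofList [c]) pt.toList)).length)).toNat
        = m * m - (List.take (m * m) (List.map (fun c => String.ofList [c]) pt.toList)).length
        from by omega]
    apply List.map_congr_left
    intro a ha
    have ham : a < m := List.mem_range.mp ha
    simp only [Function.comp_apply]
    have hfun : (fun (row : List String) (j : ℕ) =>
        if (a : Int) * ↑m + ↑j < (pt.toList.length : Int) then
          row ++ [(Option.map (fun c => String.ofList [c])
            (PySem.List.pyGet? pt.toList ((a : Int) * ↑m + ↑j))).getD "@"]
        else row ++ ["@"])
        = fun row j =>
            row ++ [((pt.toList.map (fun c => String.ofList [c]))[a * m + j]?).getD "@"] := by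
      funext row j
      have hc : ((a : Int) * ↑m + ↑j) = ((a * m + j : ℕ) : Int) := by push_cast; ring
      rw [hc, PySem.List.pyGet?_natCast, List.getElem?_map]
      by_cases hL : a * m + j < pt.toList.length
      · rw [if_pos (by exact_mod_cast hL)]
      · rw [if_neg (by exact_mod_cast hL), List.getElem?_eq_none (by omega)]
        rfl
    rw [hfun, PySem.List.foldl_append_singleton_eq_map, List.nil_append]
    rw [show ((a : Int) * ↑m) = ((a * m : ℕ) : Int) from by push_cast; ring]
    rw [show (((a : Int)) + 1) * ↑m = ((a * m + m : ℕ) : Int) from by push_cast; ring]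
    rw [PySem.List.slice_natCast, Nat.add_sub_cancel_left]
    apply List.ext_getElem?
    intro k
    rw [List.getElem?_take]
    by_cases hk : k < m
    · rw [if_pos hk, List.getElem?_drop, List.getElem?_map, List.getElem?_range hk,
        pv_padded_getElem? _ _ _ _ (pv_lt_sq ham hk), Option.map_some]
    · have hr : (List.range m)[k]? = none := List.getElem?_eq_none (by simp; omega)
      rw [if_neg hk, List.getElem?_map, hr]
      rfl
  · have h' : n ≤ 0 := by omega
    simp [columnar_matrix, columnar_matrix_alt, h']

-- ===== VERDICT (by name: the statement is the Claim_ definition above) =====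
theorem columnar_matrix_spec : Claim_equal_columnar_matrix := by
  intro n plain_text _
  exact pv_main n plain_text
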